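-- pv_equiv track=rewrite | github.com/zubair-ce07/testtt | Jackwills.py | product_gender
-- ===== SOURCE A (Python) =====
-- def product_gender(category_list):
--     gender_dict = {'Gentlemen': 'men', 'Ladies': 'women'}
--     gender_ = ''
--
--     for item in category_list:
--         if item in gender_dict:
--             gender_ = gender_dict[item]
--         else:
--             gender_ = 'unisex adults'
--
--     return gender_
-- ===== SOURCE B (Python) =====
-- def product_gender(category_list):
--     if not category_list:
--         return ''
--     gender_dict = {'Gentlemen': 'men', 'Ladies': 'women'}
--     return gender_dict.get(category_list[-1], 'unisex adults')
-- ===== Notes on version B (the rewrite author's own statement) =====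
-- stated objective: simpler
-- what changed: B replaces the loop over the whole list by a single dict lookup on the last element (only the last iteration's assignment survives), guarding the empty list with ''.
import Mathlib
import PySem

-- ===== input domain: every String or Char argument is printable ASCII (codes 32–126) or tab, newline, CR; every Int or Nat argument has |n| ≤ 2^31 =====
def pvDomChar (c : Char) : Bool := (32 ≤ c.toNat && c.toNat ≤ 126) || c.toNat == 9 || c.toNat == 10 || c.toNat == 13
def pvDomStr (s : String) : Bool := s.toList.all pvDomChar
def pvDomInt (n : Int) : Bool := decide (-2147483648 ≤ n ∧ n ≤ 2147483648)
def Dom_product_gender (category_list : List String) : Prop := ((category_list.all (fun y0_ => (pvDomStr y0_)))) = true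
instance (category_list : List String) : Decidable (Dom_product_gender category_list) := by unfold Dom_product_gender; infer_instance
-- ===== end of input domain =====

-- B drops A's loop: only the last element determines the result, so B does one dict lookup on it ('' for the empty list).

-- ===== PORT A =====
-- A: loop over category_list, overwriting gender_ each iteration.
def product_gender (category_list : List String) : String :=
  let gender_dict : PySem.Dict String String :=
    PySem.Dict.ofList [("Gentlemen", "men"), ("Ladies", "women")]
  let gender_ :=
    category_list.foldl
      (fun gender_ item =>
        if gender_dict.contains item then gender_dict.getD item ""
        else "unisex adults")
      ""
  gender_

-- ===== PORT B =====
-- B: single lookup on the last element.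
def product_gender_alt (category_list : List String) : String :=
  match category_list.getLast? with
  | none => ""
  | some last =>
    let gender_dict : PySem.Dict String String :=
      PySem.Dict.ofList [("Gentlemen", "men"), ("Ladies", "women")]
    gender_dict.getD last "unisex adults"

-- ===== PRECONDITION & SPEC =====
def Spec_product_gender (category_list : List String) (out : String) : Prop := out = product_gender_alt category_list
instance (category_list : List String) (out : String) : Decidable (Spec_product_gender category_list out) := by unfold Spec_product_gender; infer_instance

-- ===== CLAIM (what is proved, stated in full; the proofs are below) =====
def Claim_equal_product_gender : Prop := ∀ (category_list : List String), Dom_product_gender category_list → Spec_product_gender category_list (product_gender category_list)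

-- ===== LEMMAS AND PROOFS =====

-- A's fold ignores its accumulator: the result is g applied to the last element.
theorem pg_foldl_getLast (l : List String) (a : String) (g : String → String) (x : String)
    (h : l.getLast? = some x) :
    l.foldl (fun _ item => g item) a = g x := by
  induction l generalizing a with
  | nil => simp at h
  | cons y ys ih =>
    cases hys : ys with
    | nil => simp [hys] at h; simp [h]
    | cons z zs =>
      subst hys
      rw [List.getLast?_cons_cons] at h
      simpa using ih (g y) h

-- ===== VERDICT (by name: the statement is the Claim_ definition above) =====
theorem product_gender_spec : Claim_equal_product_gender := by
  intro l _
  unfold Spec_product_gender product_gender product_gender_alt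
  cases h : l.getLast? with
  | none => simp at h; simp [h]
  | some x =>
    simp only
    rw [pg_foldl_getLast l "" _ x h]
    have hd : (PySem.Dict.ofList [("Gentlemen", "men"), ("Ladies", "women")]
        : PySem.Dict String String).items = [("Gentlemen", "men"), ("Ladies", "women")] := by
      decide
    by_cases h1 : x = "Gentlemen"
    · simp [h1, PySem.Dict.contains, PySem.Dict.getD, PySem.Dict.get?, hd, List.find?]
    · by_cases h2 : x = "Ladies"
      · simp [h2, PySem.Dict.contains, PySem.Dict.getD, PySem.Dict.get?, hd, List.find?]
      · have b1 : ("Gentlemen" == x) = false := by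
          simp [beq_eq_false_iff_ne, Ne.symm h1]
        have b2 : ("Ladies" == x) = false := by
          simp [beq_eq_false_iff_ne, Ne.symm h2]
        simp [PySem.Dict.contains, PySem.Dict.getD, PySem.Dict.get?, hd, List.find?,
              Ne.symm h1, Ne.symm h2, b1, b2]
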